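-- pv_equiv track=rewrite | github.com/Oana-Florentina/Calcul-Numeric | Tema_4/main_2.py | create_vectors
-- ===== SOURCE A (Python) =====
-- def create_vectors(n, element_list):
--     values = []
--     ind_col = []
--     row_start = [0] * (n + 1)
--
--     sorted_elements = sorted(element_list, key=lambda x: (x[1], x[2]))
--
--     last_row = -1
--     last_column = -1
--     for i, (value, row, col) in enumerate(sorted_elements):
--         if row == last_row and col == last_column:
--             values[-1] += value
--         else:
--             values.append(value)
--             ind_col.append(col)
--
--         if row != last_row:
--             row_start[row] = len(values) - 1
--             last_row = row
--
--         last_column = col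
--
--     row_start[n] = len(values)
--
--     return values, ind_col, row_start
-- ===== SOURCE B (Python) =====
-- def create_vectors(n, element_list):
--     # One dict pass aggregates duplicate (row, col) entries; only the distinct
--     # keys are then sorted and emitted, instead of sorting the whole element
--     # list and merging consecutive duplicates in a stateful scan.
--     acc = {}
--     for value, row, col in element_list:
--         key = (row, col)
--         acc[key] = acc.get(key, 0) + value
--
--     values = []
--     ind_col = []
--     row_start = [0] * (n + 1)
--
--     last_row = -1
--     for row, col in sorted(acc):
--         if row != last_row:
--             row_start[row] = len(values)
--             last_row = row
--         values.append(acc[(row, col)])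
--         ind_col.append(col)
--
--     row_start[n] = len(values)
--
--     return values, ind_col, row_start
-- ===== Notes on version B (the rewrite author's own statement) =====
-- stated objective: alternative
-- what changed: Replaces A's full sort of the element list followed by a stateful merge-of-consecutive-duplicates scan with a single dict pass that aggregates duplicate (row,col) keys, then sorts only the distinct keys and emits the CSR vectors from the aggregate.
import Mathlib
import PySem

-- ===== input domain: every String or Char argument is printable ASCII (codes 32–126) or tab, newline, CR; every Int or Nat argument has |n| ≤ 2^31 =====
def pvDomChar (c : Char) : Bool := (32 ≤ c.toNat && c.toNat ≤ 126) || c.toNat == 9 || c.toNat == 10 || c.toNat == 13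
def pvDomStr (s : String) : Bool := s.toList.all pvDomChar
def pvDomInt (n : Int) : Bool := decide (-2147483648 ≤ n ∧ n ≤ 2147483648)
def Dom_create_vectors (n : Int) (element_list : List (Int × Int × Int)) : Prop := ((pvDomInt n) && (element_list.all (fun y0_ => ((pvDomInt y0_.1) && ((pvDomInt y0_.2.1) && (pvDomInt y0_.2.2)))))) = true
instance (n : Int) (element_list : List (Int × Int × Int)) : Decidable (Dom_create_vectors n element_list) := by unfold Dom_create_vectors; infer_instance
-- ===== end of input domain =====

-- B aggregates duplicate (row, col) entries in one dict pass and sorts only the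
-- distinct keys, instead of sorting the whole list and merging consecutive duplicates.

-- ===== PORT A =====
def create_vectors (n : Int) (element_list : List (Int × Int × Int)) : List Int × List Int × List Int :=
  let values : List Int := []
  let ind_col : List Int := []
  let row_start : List Int := List.replicate (n + 1).toNat 0
  let sorted_elements := PySem.List.sorted2 element_list (fun x => x.2.1) (fun x => x.2.2)
  let st := (PySem.List.enumerate sorted_elements).foldl
    (fun (st : List Int × List Int × List Int × Int × Int) p =>
      let (values, ind_col, row_start, last_row, last_column) := st
      let (value, row, col) := p.2
      let (values, ind_col) :=
        if row = last_row ∧ col = last_column then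
          -- values[-1] += value
          (PySem.List.pySetD values (-1) (PySem.List.pyGetD values (-1) 0 + value), ind_col)
        else
          (values ++ [value], ind_col ++ [col])
      let (row_start, last_row) :=
        if row ≠ last_row then
          (PySem.List.pySetD row_start row ((values.length : Int) - 1), row)
        else (row_start, last_row)
      (values, ind_col, row_start, last_row, col))
    (values, ind_col, row_start, (-1 : Int), (-1 : Int))
  (st.1, st.2.1, PySem.List.pySetD st.2.2.1 n (st.1.length : Int))

-- ===== PORT B =====
def create_vectors_alt (n : Int) (element_list : List (Int × Int × Int)) : List Int × List Int × List Int :=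
  let acc := element_list.foldl
    (fun (acc : PySem.Dict (Int × Int) Int) x => acc.insert x.2 (acc.getD x.2 0 + x.1))
    PySem.Dict.empty
  let st := (PySem.List.sorted2 acc.keys (fun k => k.1) (fun k => k.2)).foldl
    (fun (st : List Int × List Int × List Int × Int) k =>
      let (values, ind_col, row_start, last_row) := st
      let (row_start, last_row) :=
        if k.1 ≠ last_row then (PySem.List.pySetD row_start k.1 (values.length : Int), k.1)
        else (row_start, last_row)
      (values ++ [acc.getD (k.1, k.2) 0], ind_col ++ [k.2], row_start, last_row))
    ([], [], List.replicate (n + 1).toNat 0, (-1 : Int))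
  (st.1, st.2.1, PySem.List.pySetD st.2.2.1 n (st.1.length : Int))

-- ===== PRECONDITION & SPEC =====
-- Pre_ excludes exactly the inputs on which A raises IndexError: negative n
-- (row_start[n]), an entry whose row lies outside [-(n+1), n] (row_start[row]), or a
-- lexicographically minimal (row, col) key equal to (-1, -1) (values[-1] on the first
-- loop iteration, since last_row/last_column start at -1). Nothing is claimed there.
def Pre_create_vectors (n : Int) (element_list : List (Int × Int × Int)) : Prop :=
  0 ≤ n ∧ (∀ x ∈ element_list, -(n + 1) ≤ x.2.1 ∧ x.2.1 ≤ n) ∧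
    ¬ ((∃ x ∈ element_list, x.2 = (-1, -1)) ∧
       (∀ y ∈ element_list, ¬ (y.2.1 < -1 ∨ (y.2.1 = -1 ∧ y.2.2 < -1))))
instance (n : Int) (element_list : List (Int × Int × Int)) : Decidable (Pre_create_vectors n element_list) := by unfold Pre_create_vectors; infer_instance

def pvWitness_create_vectors : Int × (List (Int × Int × Int)) := (2, [(3, 0, 1), (1, 1, 0), (2, 0, 1)])

def Spec_create_vectors (n : Int) (element_list : List (Int × Int × Int)) (out : List Int × List Int × List Int) : Prop := out = create_vectors_alt n element_list
instance (n : Int) (element_list : List (Int × Int × Int)) (out : List Int × List Int × List Int) : Decidable (Spec_create_vectors n element_list out) := by unfold Spec_create_vectors; infer_instance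

-- ===== CLAIM (what is proved, stated in full; the proofs are below) =====
def Claim_equal_create_vectors : Prop := ∀ (n : Int) (element_list : List (Int × Int × Int)), Dom_create_vectors n element_list → Pre_create_vectors n element_list → Spec_create_vectors n element_list (create_vectors n element_list)

-- ===== LEMMAS AND PROOFS =====

abbrev ElT : Type := Int × Int × Int

-- last-element get/set (Python values[-1] on a nonempty list)
theorem pyGetD_snoc_neg_one {l : List Int} {s : Int} :
    PySem.List.pyGetD (l ++ [s]) (-1) 0 = s := by
  simp [PySem.List.pyGetD, PySem.List.pyGet?, PySem.List.pyIdx?]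

theorem pySetD_snoc_neg_one {l : List Int} {s w : Int} :
    PySem.List.pySetD (l ++ [s]) (-1) w = l ++ [w] := by
  simp [PySem.List.pySetD, PySem.List.pySet?, PySem.List.pyIdx?]

theorem filter_eq_takeWhile_of_drop_none {α : Type} (p : α → Bool) (l : List α)
    (h : ∀ y ∈ l.dropWhile p, p y = false) : l.filter p = l.takeWhile p := by
  conv_lhs => rw [← List.takeWhile_append_dropWhile (p := p) (l := l)]
  rw [List.filter_append]
  have h1 : (l.takeWhile p).filter p = l.takeWhile p :=
    List.filter_eq_self.mpr (fun a ha => List.mem_takeWhile_imp ha)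
  have h2 : (l.dropWhile p).filter p = [] := by
    rw [List.filter_eq_nil_iff]; intro a ha; simp [h a ha]
  rw [h1, h2, List.append_nil]

-- the elements dropped after a maximal run have a different (row, col) pair
theorem dropWhile_run_ne {κ : Type} [LinearOrder κ] (nu : Int × Int → κ) (x : ElT) (xs : List ElT)
    (hpw : (x :: xs).Pairwise (fun a b => nu a.2 ≤ nu b.2))
    (hinj : ∀ a ∈ x :: xs, ∀ b ∈ x :: xs, nu a.2 = nu b.2 → a.2 = b.2) :
    ∀ y ∈ xs.dropWhile (fun y => y.2 == x.2), ¬ y.2 = x.2 := by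
  induction xs with
  | nil => simp
  | cons z zs ih =>
    simp only [List.dropWhile_cons]
    cases hp : (z.2 == x.2) with
    | true =>
      simp only [if_pos rfl]
      refine ih ?_ ?_
      · have := hpw.sublist (l₁ := x :: zs) (by
          refine List.Sublist.cons₂ x ?_
          exact (List.sublist_cons_self z zs))
        exact this
      · intro a ha b hb
        have ha' : a ∈ x :: z :: zs := by
          rcases List.mem_cons.mp ha with rfl | h
          · exact List.mem_cons_self
          · exact List.mem_cons_of_mem _ (List.mem_cons_of_mem _ h)
        have hb' : b ∈ x :: z :: zs := by
          rcases List.mem_cons.mp hb with rfl | h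
          · exact List.mem_cons_self
          · exact List.mem_cons_of_mem _ (List.mem_cons_of_mem _ h)
        exact hinj a ha' b hb'
    | false =>
      rw [if_neg (by simp)]
      intro y hy
      rcases List.mem_cons.mp hy with rfl | hy'
      · intro hc; rw [hc] at hp; simp at hp
      · intro hc
        have hxz : nu x.2 ≤ nu z.2 := (List.pairwise_cons.mp hpw).1 z (by simp)
        have hzy : nu z.2 ≤ nu y.2 := by
          have hpw' := (List.pairwise_cons.mp hpw).2
          exact (List.pairwise_cons.mp hpw').1 y hy'
        have hyx : nu y.2 = nu x.2 := by rw [hc]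
        have hzx : nu z.2 = nu x.2 := le_antisymm (hzy.trans (le_of_eq hyx)) hxz
        have : z.2 = x.2 := hinj z (by simp) x (by simp) hzx
        rw [this] at hp; simp at hp

-- ---------- run decomposition ----------

-- one (summed value, row, col) entry per maximal run of equal (row, col)
def runsR : List ElT → List ElT
  | [] => []
  | x :: xs =>
    (x.1 + ((xs.takeWhile (fun y => y.2 == x.2)).map (·.1)).sum, x.2.1, x.2.2)
      :: runsR (xs.dropWhile (fun y => y.2 == x.2))
termination_by l => l.length
decreasing_by
  simp only [List.length_cons]
  exact Nat.lt_succ_of_le (List.length_dropWhile_le _ _)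

theorem runsR_pairs : ∀ (l : List ElT), ∀ e ∈ runsR l, ∃ y ∈ l, e.2 = y.2
  | [] => by simp [runsR]
  | x :: xs => by
    rw [runsR]
    intro e he
    rcases List.mem_cons.mp he with rfl | he'
    · exact ⟨x, List.mem_cons_self, rfl⟩
    · obtain ⟨y, hy, hey⟩ := runsR_pairs (xs.dropWhile (fun y => y.2 == x.2)) e he'
      exact ⟨y, List.mem_cons_of_mem _ ((List.dropWhile_sublist _).mem hy), hey⟩
termination_by l => l.length
decreasing_by
  simp only [List.length_cons]
  exact Nat.lt_succ_of_le (List.length_dropWhile_le _ _)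

theorem runsR_pairs_complete : ∀ (l : List ElT), ∀ y ∈ l, ∃ e ∈ runsR l, e.2 = y.2
  | [], _, hy => by simp at hy
  | x :: xs, y, hy => by
    rw [runsR]
    rcases List.mem_cons.mp hy with rfl | hy'
    · exact ⟨_, List.mem_cons_self, rfl⟩
    · by_cases hp : y.2 = x.2
      · exact ⟨_, List.mem_cons_self, hp.symm⟩
      · have hmem : y ∈ xs.dropWhile (fun z => z.2 == x.2) := by
          have hsplit := List.takeWhile_append_dropWhile
            (p := fun (z : ElT) => (z.2 == x.2)) (l := xs)
          rcases List.mem_append.mp (hsplit ▸ hy') with h | h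
          · exact absurd (by simpa using List.mem_takeWhile_imp h) hp
          · exact h
        obtain ⟨e, he, hey⟩ := runsR_pairs_complete _ y hmem
        exact ⟨e, List.mem_cons_of_mem _ he, hey⟩
termination_by l => l.length
decreasing_by
  simp only [List.length_cons]
  exact Nat.lt_succ_of_le (List.length_dropWhile_le _ _)

theorem runsR_pairwise_lt : ∀ (l : List ElT),
    l.Pairwise (fun a b => (toLex a.2 : Lex (Int × Int)) ≤ toLex b.2) →
    (runsR l).Pairwise (fun e f => (toLex e.2 : Lex (Int × Int)) < toLex f.2)
  | [] => by simp [runsR]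
  | x :: xs => fun hpw => by
    rw [runsR]
    refine List.pairwise_cons.mpr ⟨?_, ?_⟩
    · intro f hf
      obtain ⟨y, hy, hfy⟩ := runsR_pairs _ f hf
      have hymem : y ∈ xs := (List.dropWhile_sublist _).mem hy
      have hle : (toLex x.2 : Lex (Int × Int)) ≤ toLex y.2 :=
        (List.pairwise_cons.mp hpw).1 y hymem
      have hne : ¬ y.2 = x.2 :=
        dropWhile_run_ne toLex x xs hpw (fun a _ b _ h => toLex_inj.mp h) y hy
      have hlt : (toLex x.2 : Lex (Int × Int)) < toLex y.2 :=
        lt_of_le_of_ne hle (fun hc => hne (toLex_inj.mp hc.symm))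
      show (toLex x.2 : Lex (Int × Int)) < toLex f.2
      rw [hfy]
      exact hlt
    · exact runsR_pairwise_lt _
        (hpw.sublist ((List.dropWhile_sublist _).trans (List.sublist_cons_self _ _)))
termination_by l => l.length
decreasing_by
  simp only [List.length_cons]
  exact Nat.lt_succ_of_le (List.length_dropWhile_le _ _)

theorem runsR_entry_sum : ∀ (l : List ElT),
    l.Pairwise (fun a b => (toLex a.2 : Lex (Int × Int)) ≤ toLex b.2) →
    ∀ e ∈ runsR l, e.1 = ((l.filter (fun y => y.2 == e.2)).map (·.1)).sum
  | [], _ => by simp [runsR]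
  | x :: xs, hpw => fun e he => by
    have hdrop : ∀ y ∈ xs.dropWhile (fun y => y.2 == x.2), ¬ y.2 = x.2 :=
      dropWhile_run_ne toLex x xs hpw (fun a _ b _ h => toLex_inj.mp h)
    have hfd : ∀ y ∈ xs.dropWhile (fun y => y.2 == x.2), (fun (y : ElT) => y.2 == x.2) y = false :=
      fun y hy => by simpa using hdrop y hy
    rw [runsR] at he
    rcases List.mem_cons.mp he with rfl | he'
    · have h1 : xs.filter (fun y => y.2 == x.2) = xs.takeWhile (fun y => y.2 == x.2) :=
        filter_eq_takeWhile_of_drop_none _ _ hfd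
    -- the entry's pair is definitionally x.2
      show x.1 + ((xs.takeWhile (fun y => y.2 == x.2)).map (·.1)).sum
        = (((x :: xs).filter (fun y => y.2 == x.2)).map (·.1)).sum
      rw [List.filter_cons_of_pos (by simp), h1]
      simp
    · obtain ⟨z, hz, hez⟩ := runsR_pairs _ e he'
      have hzx : ¬ z.2 = x.2 := hdrop z hz
      have hrec := runsR_entry_sum _
        (hpw.sublist ((List.dropWhile_sublist _).trans (List.sublist_cons_self _ _))) e he'
      rw [hrec]
      have hxe : ¬ ((x : ElT).2 == e.2) = true := by
        rw [hez]
        simp only [beq_iff_eq]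
        intro hc
        exact hzx (hc.symm)
      have hfilter : (x :: xs).filter (fun y => y.2 == e.2)
          = (xs.dropWhile (fun y => y.2 == x.2)).filter (fun y => y.2 == e.2) := by
        rw [List.filter_cons_of_neg (p := fun (y : ElT) => y.2 == e.2) (a := x) (l := xs) hxe]
        conv_lhs => rw [← List.takeWhile_append_dropWhile
          (p := fun (y : ElT) => y.2 == x.2) (l := xs)]
        rw [List.filter_append]
        have h0 : (xs.takeWhile (fun y => y.2 == x.2)).filter (fun y => y.2 == e.2) = [] := by
          rw [List.filter_eq_nil_iff]
          intro a ha
          have hax : a.2 = x.2 := by simpa using List.mem_takeWhile_imp ha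
          rw [hez]
          simp only [beq_iff_eq]
          intro hc
          exact hzx (hc.symm.trans hax)
        rw [h0, List.nil_append]
      rw [hfilter]
termination_by l => l.length
decreasing_by
  simp only [List.length_cons]
  exact Nat.lt_succ_of_le (List.length_dropWhile_le _ _)

-- ---------- canonical emission ----------

def emitStep (st : List Int × List Int × List Int × Int) (e : ElT) :
    List Int × List Int × List Int × Int :=
  (st.1 ++ [e.1], st.2.1 ++ [e.2.2],
    if e.2.1 ≠ st.2.2.2 then PySem.List.pySetD st.2.2.1 e.2.1 (st.1.length : Int) else st.2.2.1,
    e.2.1)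

def emitE (st : List Int × List Int × List Int × Int) (D : List ElT) :
    List Int × List Int × List Int × Int :=
  D.foldl emitStep st

-- ---------- A's loop ----------

def stepA (st : List Int × List Int × List Int × Int × Int) (x : ElT) :
    List Int × List Int × List Int × Int × Int :=
  let (values, ind_col, row_start, last_row, last_column) := st
  let (value, row, col) := x
  let (values, ind_col) :=
    if row = last_row ∧ col = last_column then
      (PySem.List.pySetD values (-1) (PySem.List.pyGetD values (-1) 0 + value), ind_col)
    else
      (values ++ [value], ind_col ++ [col])
  let (row_start, last_row) :=
    if row ≠ last_row then
      (PySem.List.pySetD row_start row ((values.length : Int) - 1), row)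
    else (row_start, last_row)
  (values, ind_col, row_start, last_row, col)

theorem foldl_enumerate_snd {α β : Type} (f : β → α → β) :
    ∀ (l : List α) (b : β) (s : Int),
    (PySem.List.enumerate l s).foldl (fun st p => f st p.2) b = l.foldl f b
  | [], _, _ => rfl
  | x :: xs, b, s => by
    rw [PySem.List.enumerate_cons, List.foldl_cons, List.foldl_cons]
    exact foldl_enumerate_snd f xs (f b x) (s + 1)

-- merging a run of equal (row, col) sums the values into the last slot
theorem runA (pr : Int × Int) : ∀ (run : List ElT), (∀ y ∈ run, y.2 = pr) →
    ∀ (v i rs : List Int) (s : Int),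
    run.foldl stepA (v ++ [s], i, rs, pr.1, pr.2) =
      (v ++ [s + (run.map (·.1)).sum], i, rs, pr.1, pr.2)
  | [], _, v, i, rs, s => by simp
  | y :: run, h, v, i, rs, s => by
    have hy : y.2 = pr := h y List.mem_cons_self
    rw [List.foldl_cons]
    have hst : stepA (v ++ [s], i, rs, pr.1, pr.2) y = (v ++ [s + y.1], i, rs, pr.1, pr.2) := by
      obtain ⟨xv, xp⟩ := y
      simp only at hy
      subst hy
      simp [stepA, pyGetD_snoc_neg_one, pySetD_snoc_neg_one]
    rw [hst, runA pr run (fun z hz => h z (List.mem_cons_of_mem _ hz)) v i rs (s + y.1)]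
    simp [add_assoc]

-- A's stateful scan over a key-sorted list is the canonical emission of its runs
theorem foldA_char : ∀ (l : List ElT) (v i rs : List Int) (lr lc : Int),
    l.Pairwise (fun a b => (toLex a.2 : Lex (Int × Int)) ≤ toLex b.2) →
    (∀ z, l.head? = some z → ¬ (z.2.1 = lr ∧ z.2.2 = lc)) →
    (fun st => (st.1, st.2.1, st.2.2.1)) (l.foldl stepA (v, i, rs, lr, lc)) =
      (fun st => (st.1, st.2.1, st.2.2.1)) (emitE (v, i, rs, lr) (runsR l))
  | [], v, i, rs, lr, lc, _, _ => by simp [emitE, runsR]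
  | x :: xs, v, i, rs, lr, lc, hpw, hfresh => by
    have hx : ¬ (x.2.1 = lr ∧ x.2.2 = lc) := hfresh x rfl
    have hsplit : xs = xs.takeWhile (fun y => y.2 == x.2) ++ xs.dropWhile (fun y => y.2 == x.2) :=
      (List.takeWhile_append_dropWhile).symm
    have hst : stepA (v, i, rs, lr, lc) x =
        (v ++ [x.1], i ++ [x.2.2],
          (if x.2.1 ≠ lr then PySem.List.pySetD rs x.2.1 (v.length : Int) else rs),
          (if x.2.1 ≠ lr then x.2.1 else lr), x.2.2) := by
      obtain ⟨xv, xr, xc⟩ := x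
      replace hx : ¬ (xr = lr ∧ xc = lc) := hx
      simp only [stepA, if_neg hx]
      by_cases hr : xr = lr <;> simp [hr]
    rw [List.foldl_cons, hst]
    have hlr' : (if x.2.1 ≠ lr then x.2.1 else lr) = x.2.1 := by
      by_cases h : x.2.1 = lr <;> simp [h]
    rw [hlr']
    have hrun : ∀ y ∈ xs.takeWhile (fun y => y.2 == x.2), y.2 = x.2 := by
      intro y hy; simpa using List.mem_takeWhile_imp hy
    conv_lhs => rw [hsplit]
    rw [List.foldl_append, runA x.2 _ hrun]
    have hsub : (xs.dropWhile (fun y => y.2 == x.2)).Sublist (x :: xs) :=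
      (List.dropWhile_sublist _).trans (List.sublist_cons_self _ _)
    have hdrop : ∀ y ∈ xs.dropWhile (fun y => y.2 == x.2), ¬ y.2 = x.2 :=
      dropWhile_run_ne toLex x xs hpw (fun a _ b _ h => toLex_inj.mp h)
    have hrec := foldA_char (xs.dropWhile (fun y => y.2 == x.2))
      (v ++ [x.1 + ((xs.takeWhile (fun y => y.2 == x.2)).map (·.1)).sum])
      (i ++ [x.2.2])
      (if x.2.1 ≠ lr then PySem.List.pySetD rs x.2.1 (v.length : Int) else rs)
      x.2.1 x.2.2
      (hpw.sublist hsub)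
      (by
        intro z hz hc
        exact hdrop z (List.mem_of_head? hz) (Prod.ext hc.1 hc.2))
    rw [runsR]
    rw [emitE, List.foldl_cons]
    have hemit : emitStep (v, i, rs, lr)
        (x.1 + ((xs.takeWhile (fun y => y.2 == x.2)).map (·.1)).sum, x.2.1, x.2.2) =
        (v ++ [x.1 + ((xs.takeWhile (fun y => y.2 == x.2)).map (·.1)).sum], i ++ [x.2.2],
          (if x.2.1 ≠ lr then PySem.List.pySetD rs x.2.1 (v.length : Int) else rs), x.2.1) := by
      simp [emitStep]
    rw [hemit]
    exact hrec
termination_by l => l.length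
decreasing_by
  simp only [List.length_cons]
  exact Nat.lt_succ_of_le (List.length_dropWhile_le _ _)

-- ---------- the tuple-key insertion sort is the lex-key insertion sort ----------

theorem insertBy_congr {α : Type} (bf bg : α → α → Bool) (x : α) : ∀ (ys : List α),
    (∀ b ∈ ys, bf x b = bg x b) →
    PySem.List.insertBy bf x ys = PySem.List.insertBy bg x ys
  | [], _ => rfl
  | y :: ys, h => by
    have hy := h y List.mem_cons_self
    simp only [PySem.List.insertBy, hy]
    by_cases hc : bg x y = true
    · simp [hc]
    · simp only [hc, if_neg hc]
      rw [insertBy_congr bf bg x ys (fun b hb => h b (List.mem_cons_of_mem _ hb))]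

theorem foldl_insertBy_congr {α : Type} (bf bg : α → α → Bool) : ∀ (l acc : List α),
    (∀ a, (a ∈ l ∨ a ∈ acc) → ∀ b, (b ∈ l ∨ b ∈ acc) → bf a b = bg a b) →
    l.foldl (fun acc x => PySem.List.insertBy bf x acc) acc
      = l.foldl (fun acc x => PySem.List.insertBy bg x acc) acc
  | [], _, _ => rfl
  | x :: l, acc, h => by
    rw [List.foldl_cons, List.foldl_cons]
    rw [insertBy_congr bf bg x acc
      (fun b hb => h x (Or.inl List.mem_cons_self) b (Or.inr hb))]
    refine foldl_insertBy_congr bf bg l (PySem.List.insertBy bg x acc) ?_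
    intro a ha b hb
    have hmem : ∀ c, c ∈ l ∨ c ∈ PySem.List.insertBy bg x acc →
        (c ∈ x :: l ∨ c ∈ acc) := by
      intro c hc
      rcases hc with hc | hc
      · exact Or.inl (List.mem_cons_of_mem _ hc)
      · rcases (PySem.List.mem_insertBy bg x c acc).mp hc with rfl | hc
        · exact Or.inl List.mem_cons_self
        · exact Or.inr hc
    exact h a (hmem a ha) b (hmem b hb)

theorem sorted2_eq_sorted_lex {α : Type} (l : List α) (k1 k2 : α → Int) :
    PySem.List.sorted2 l k1 k2
      = PySem.List.sorted l (fun x => (toLex (k1 x, k2 x) : Lex (Int × Int))) := by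
  rw [PySem.List.sorted_eq_foldl_insertBy]
  show l.foldl (fun acc x => PySem.List.insertBy
      (fun a b => decide (k1 a < k1 b) || (!decide (k1 b < k1 a) && decide (k2 a < k2 b)))
      x acc) []
    = l.foldl (fun acc x => PySem.List.insertBy
      (fun a b => decide ((toLex (k1 a, k2 a) : Lex (Int × Int)) < toLex (k1 b, k2 b))) x acc) []
  refine foldl_insertBy_congr _ _ l [] (fun a _ b _ => ?_)
  have hiff : (toLex (k1 a, k2 a) : Lex (Int × Int)) < toLex (k1 b, k2 b)
      ↔ (k1 a < k1 b ∨ (k1 a = k1 b ∧ k2 a < k2 b)) := by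
    simp [Prod.Lex.lt_iff]
  by_cases h1 : k1 a < k1 b <;> by_cases h2 : k1 b < k1 a <;>
    by_cases h3 : k2 a < k2 b <;> simp [h1, h2, h3, hiff] <;> omega

-- ---------- B's aggregation dict ----------

theorem getD_acc_fold : ∀ (l : List ElT) (p : Int × Int),
    (l.foldl (fun (d : PySem.Dict (Int × Int) Int) x => d.insert x.2 (d.getD x.2 0 + x.1))
      PySem.Dict.empty).getD p 0
      = ((l.filter (fun y => y.2 == p)).map (·.1)).sum := by
  intro l
  induction l using List.reverseRecOn with
  | nil => intro p; simp [PySem.Dict.getD_empty]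
  | append_singleton l x ih =>
    intro p
    rw [List.foldl_append, List.foldl_cons, List.foldl_nil, PySem.Dict.getD_insert,
      List.filter_append]
    by_cases hp : p = x.2
    · rw [if_pos hp, ih, List.filter_cons_of_pos (by simp [hp])]
      simp [hp]
    · rw [if_neg hp, ih, List.filter_cons_of_neg (by simp; intro hc; exact hp hc.symm)]
      simp

theorem keys_acc (l : List ElT) :
    (l.foldl (fun (d : PySem.Dict (Int × Int) Int) x => d.insert x.2 (d.getD x.2 0 + x.1))
      PySem.Dict.empty).keys
      = PySem.Set.update ([] : PySem.Set (Int × Int)) (l.map (·.2)) := by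
  have h := PySem.Dict.keys_foldl_insert_key l (fun (x : ElT) => x.2)
    (fun d x => d.getD x.2 0 + x.1) PySem.Dict.empty
  rw [PySem.Dict.keys_empty] at h
  exact h

theorem nodup_keys_acc (l : List ElT) :
    (l.foldl (fun (d : PySem.Dict (Int × Int) Int) x => d.insert x.2 (d.getD x.2 0 + x.1))
      PySem.Dict.empty).keys.Nodup :=
  PySem.Dict.nodup_keys_foldl_insert_key l (fun (x : ElT) => x.2)
    (fun d x => d.getD x.2 0 + x.1) PySem.Dict.empty
    (by rw [PySem.Dict.keys_empty]; exact List.nodup_nil)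

-- ---------- characterizing the two ports ----------

theorem A_char (n : Int) (el : List ElT)
    (hmin : ∀ z, (PySem.List.sorted el
        (fun x => (toLex (x.2.1, x.2.2) : Lex (Int × Int)))).head? = some z →
      ¬ (z.2.1 = -1 ∧ z.2.2 = -1)) :
    create_vectors n el =
      (fun st => (st.1, st.2.1, PySem.List.pySetD st.2.2.1 n (st.1.length : Int)))
        (emitE ([], [], List.replicate (n + 1).toNat 0, -1)
          (runsR (PySem.List.sorted el (fun x => (toLex (x.2.1, x.2.2) : Lex (Int × Int)))))) := by
  have h0 : create_vectors n el =
      (fun st => (st.1, st.2.1, PySem.List.pySetD st.2.2.1 n (st.1.length : Int)))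
        ((PySem.List.enumerate (PySem.List.sorted2 el (fun x => x.2.1) (fun x => x.2.2))).foldl
          (fun st p => stepA st p.2)
          ([], [], List.replicate (n + 1).toNat 0, -1, -1)) := rfl
  rw [h0, sorted2_eq_sorted_lex el (fun x => x.2.1) (fun x => x.2.2),
    foldl_enumerate_snd stepA _ _ 0]
  have hchar := foldA_char
    (PySem.List.sorted el (fun x => (toLex (x.2.1, x.2.2) : Lex (Int × Int))))
    [] [] (List.replicate (n + 1).toNat 0) (-1) (-1)
    (PySem.List.sorted_pairwise el (fun x => (toLex (x.2.1, x.2.2) : Lex (Int × Int))))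
    hmin
  simp only at hchar ⊢
  have e1 := congrArg (fun t => t.1) hchar
  have e2 := congrArg (fun t => t.2.1) hchar
  have e3 := congrArg (fun t => t.2.2) hchar
  simp only at e1 e2 e3
  rw [e1, e2, e3]

-- B's per-key emission step
def stepB (acc : PySem.Dict (Int × Int) Int)
    (st : List Int × List Int × List Int × Int) (k : Int × Int) :
    List Int × List Int × List Int × Int :=
  let (values, ind_col, row_start, last_row) := st
  let (row_start, last_row) :=
    if k.1 ≠ last_row then (PySem.List.pySetD row_start k.1 (values.length : Int), k.1)
    else (row_start, last_row)
  (values ++ [acc.getD (k.1, k.2) 0], ind_col ++ [k.2], row_start, last_row)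

theorem B_char (n : Int) (el : List ElT) :
    create_vectors_alt n el =
      (fun st => (st.1, st.2.1, PySem.List.pySetD st.2.2.1 n (st.1.length : Int)))
        (emitE ([], [], List.replicate (n + 1).toNat 0, -1)
          (runsR (PySem.List.sorted el (fun x => (toLex (x.2.1, x.2.2) : Lex (Int × Int)))))) := by
  have h0 : create_vectors_alt n el =
      (fun st => (st.1, st.2.1, PySem.List.pySetD st.2.2.1 n (st.1.length : Int)))
        ((PySem.List.sorted2
            (el.foldl (fun (d : PySem.Dict (Int × Int) Int) x =>
              d.insert x.2 (d.getD x.2 0 + x.1)) PySem.Dict.empty).keys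
            (fun k => k.1) (fun k => k.2)).foldl
          (stepB (el.foldl (fun (d : PySem.Dict (Int × Int) Int) x =>
              d.insert x.2 (d.getD x.2 0 + x.1)) PySem.Dict.empty))
          ([], [], List.replicate (n + 1).toNat 0, -1)) := rfl
  rw [h0]
  have hS := PySem.List.sorted_pairwise el (fun x => (toLex (x.2.1, x.2.2) : Lex (Int × Int)))
  have hSperm := PySem.List.sorted_perm el
    (fun x => (toLex (x.2.1, x.2.2) : Lex (Int × Int))) false
  have hRlt := runsR_pairwise_lt _ hS
  -- the sorted distinct keys are exactly the run pairs, in order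
  have hkeys : PySem.List.sorted2
      (el.foldl (fun (d : PySem.Dict (Int × Int) Int) x =>
        d.insert x.2 (d.getD x.2 0 + x.1)) PySem.Dict.empty).keys
      (fun k => k.1) (fun k => k.2)
      = (runsR (PySem.List.sorted el
          (fun x => (toLex (x.2.1, x.2.2) : Lex (Int × Int))))).map (·.2) := by
    rw [sorted2_eq_sorted_lex
      ((el.foldl (fun (d : PySem.Dict (Int × Int) Int) x =>
        d.insert x.2 (d.getD x.2 0 + x.1)) PySem.Dict.empty).keys)
      (fun (k : Int × Int) => k.1) (fun (k : Int × Int) => k.2)]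
    refine PySem.List.sorted_eq_of_perm_of_pairwise_lt _ _ _ ?_ ?_
    · -- permutation: same distinct pairs
      refine (List.perm_ext_iff_of_nodup ?_ ?_).mpr ?_
      · have h1 : ((runsR (PySem.List.sorted el
            (fun x => (toLex (x.2.1, x.2.2) : Lex (Int × Int))))).map (·.2)).Pairwise
            (fun (a b : Int × Int) => (toLex a : Lex (Int × Int)) < toLex b) :=
          List.pairwise_map.mpr hRlt
        exact h1.imp (fun hlt heq => absurd (heq ▸ hlt) (lt_irrefl _))
      · exact nodup_keys_acc el
      · intro p
        rw [keys_acc, PySem.Set.mem_update]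
        simp only [List.mem_map, List.not_mem_nil, false_or]
        constructor
        · rintro ⟨e, he, rfl⟩
          obtain ⟨y, hy, hey⟩ := runsR_pairs _ e he
          exact ⟨y, hSperm.subset hy, hey.symm⟩
        · rintro ⟨y, hy, rfl⟩
          obtain ⟨e, he, hey⟩ := runsR_pairs_complete _ y (hSperm.symm.subset hy)
          exact ⟨e, he, hey⟩
    · refine List.pairwise_map.mpr (hRlt.imp ?_)
      intro a b hlt
      exact hlt
  rw [hkeys, List.foldl_map]
  have hfold : (runsR (PySem.List.sorted el
      (fun x => (toLex (x.2.1, x.2.2) : Lex (Int × Int))))).foldl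
      (fun st e => stepB (el.foldl (fun (d : PySem.Dict (Int × Int) Int) x =>
        d.insert x.2 (d.getD x.2 0 + x.1)) PySem.Dict.empty) st e.2)
      ([], [], List.replicate (n + 1).toNat 0, -1)
      = emitE ([], [], List.replicate (n + 1).toNat 0, -1)
          (runsR (PySem.List.sorted el
            (fun x => (toLex (x.2.1, x.2.2) : Lex (Int × Int))))) := by
    rw [emitE]
    refine PySem.List.foldl_congr_mem _ _ _ _ ?_
    intro st e he
    have hval : (el.foldl (fun (d : PySem.Dict (Int × Int) Int) x =>
        d.insert x.2 (d.getD x.2 0 + x.1)) PySem.Dict.empty).getD (e.2.1, e.2.2) 0 = e.1 := by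
      rw [getD_acc_fold]
      have hsum := runsR_entry_sum _ hS e he
      rw [hsum]
      have hpf : ((PySem.List.sorted el
          (fun x => (toLex (x.2.1, x.2.2) : Lex (Int × Int)))).filter
            (fun y => y.2 == e.2)).Perm (el.filter (fun y => y.2 == e.2)) :=
        hSperm.filter _
      exact ((hpf.map (·.1)).sum_eq).symm
    obtain ⟨v, i, rs, lr⟩ := st
    show stepB _ (v, i, rs, lr) e.2 = emitStep (v, i, rs, lr) e
    by_cases hr : e.2.1 = lr
    · simp only [stepB, emitStep]
      rw [if_neg (by simp [hr]), if_neg (by simp [hr]), hval]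
      simp [hr]
    · simp only [stepB, emitStep]
      rw [if_pos (by simp [hr]), if_pos (by simp [hr]), hval]
  rw [hfold]

theorem head_min (l : List ElT) (z : ElT)
    (hpw : l.Pairwise (fun a b => (toLex a.2 : Lex (Int × Int)) ≤ toLex b.2))
    (hz : l.head? = some z) :
    z ∈ l ∧ ∀ y ∈ l, (toLex z.2 : Lex (Int × Int)) ≤ toLex y.2 := by
  cases l with
  | nil => simp at hz
  | cons w ws =>
    simp only [List.head?_cons, Option.some.injEq] at hz
    subst hz
    refine ⟨List.mem_cons_self, ?_⟩
    intro y hy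
    rcases List.mem_cons.mp hy with rfl | h
    · exact le_refl _
    · exact (List.pairwise_cons.mp hpw).1 y h

-- ===== VERDICT (by name: the statement is the Claim_ definition above) =====
theorem create_vectors_spec : Claim_equal_create_vectors := by
  unfold Claim_equal_create_vectors
  intro n el _ hpre
  unfold Spec_create_vectors
  obtain ⟨hn, hrows, hmin⟩ := hpre
  rw [B_char n el]
  refine A_char n el ?_
  intro z hz hc
  apply hmin
  obtain ⟨hzS, hzmin⟩ := head_min _ z
    (PySem.List.sorted_pairwise el (fun x => (toLex (x.2.1, x.2.2) : Lex (Int × Int)))) hz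
  have hzel : z ∈ el :=
    (PySem.List.sorted_perm el
      (fun x => (toLex (x.2.1, x.2.2) : Lex (Int × Int))) false).subset hzS
  have hzpair : z.2 = ((-1 : Int), (-1 : Int)) := Prod.ext hc.1 hc.2
  refine ⟨⟨z, hzel, hzpair⟩, ?_⟩
  intro y hy hlt
  have hyS : y ∈ PySem.List.sorted el (fun x => (toLex (x.2.1, x.2.2) : Lex (Int × Int))) :=
    (PySem.List.sorted_perm el
      (fun x => (toLex (x.2.1, x.2.2) : Lex (Int × Int))) false).symm.subset hy
  have hzle : (toLex z.2 : Lex (Int × Int)) ≤ toLex y.2 := hzmin y hyS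
  have hylt : (toLex y.2 : Lex (Int × Int)) < toLex z.2 := by
    rw [hzpair]
    rw [show (toLex y.2 : Lex (Int × Int)) = toLex (y.2.1, y.2.2) from rfl]
    rw [Prod.Lex.lt_iff]
    exact hlt
  exact absurd (lt_of_lt_of_le hylt hzle) (lt_irrefl _)
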